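-- pv_equiv track=rewrite | github.com/abespitalny/CodingPuzzles | interviews/HRT/task1.py | solution
-- ===== SOURCE A (Python) =====
-- def solution(X, Y):
--     # Hash map of fractions to their counts.
--     fractions = {}
--     for i in range(len(X)):
--         if X[i] == 0:
--             fractions[X[i]] = fractions.setdefault(X[i], 0) + 1
--         else:
--             # Calculate the greatest common denominator
--             # in order to reduce the fraction.
--             factor = gcd(X[i], Y[i])
--             fraction = (X[i] // factor, Y[i] // factor)
--             fractions[fraction] = fractions.setdefault(fraction, 0) + 1
--
--     # Find the fraction with the greatest count and return it.
--     return max(fractions.values())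
--
-- def gcd(a, b):
--     while a != 0:
--         b, a = a, b % a
--     return b
-- ===== SOURCE B (Python) =====
-- # B: sort-and-scan instead of a hash-map counter: build one sortable key per
-- # element (zeros collapse to (0, 0), which no reduced fraction of a nonzero
-- # numerator can equal), sort the keys, and return the longest run of equal
-- # consecutive keys.  On empty X it returns 0 where A raises ValueError.
-- def gcd(a, b):
--     while a != 0:
--         b, a = a, b % a
--     return b
--
-- def _reduce(x, y):
--     g = gcd(x, y)
--     return (x // g, y // g)
--
-- def solution(X, Y):
--     keys = [(0, 0) if x == 0 else _reduce(x, Y[i]) for i, x in enumerate(X)]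
--     keys.sort()
--     best, run, prev = 0, 0, None
--     for k in keys:
--         run = run + 1 if k == prev else 1
--         prev = k
--         if run > best:
--             best = run
--     return best
-- ===== Notes on version B (the rewrite author's own statement) =====
-- stated objective: alternative
-- what changed: Replaces the hash-map counter over mixed int/tuple keys with a sort-and-scan: one uniform sortable pair key per element (zeros collapse to (0,0), which no reduced fraction of a nonzero numerator can equal), sort the key list, return the longest run of equal consecutive keys.
import Mathlib
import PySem

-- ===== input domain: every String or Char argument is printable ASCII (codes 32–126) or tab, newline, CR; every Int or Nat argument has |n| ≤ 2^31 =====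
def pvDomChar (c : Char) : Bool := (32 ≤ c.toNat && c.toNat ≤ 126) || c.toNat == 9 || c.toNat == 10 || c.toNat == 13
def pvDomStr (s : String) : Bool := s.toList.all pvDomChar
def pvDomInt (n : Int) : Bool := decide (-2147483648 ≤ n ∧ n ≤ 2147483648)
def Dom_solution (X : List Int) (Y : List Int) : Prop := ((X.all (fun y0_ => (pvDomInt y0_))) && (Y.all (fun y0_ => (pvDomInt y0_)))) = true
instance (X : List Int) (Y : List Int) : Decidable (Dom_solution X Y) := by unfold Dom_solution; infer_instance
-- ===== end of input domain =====

-- B replaces A's hash-map counter (mixed int/tuple keys) by sort-and-scan over uniform pair keys;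
-- equivalence is proved on all inputs where A returns (Pre_: X nonempty, no IndexError on Y).

-- ===== PORT A =====
-- helper `gcd` of Source A (Python's floored `%`); terminates since |b % a| < |a| for a ≠ 0
def pyGcd (a b : Int) : Int :=
  if _h : a = 0 then b else pyGcd (PySem.Int.mod b a) a
termination_by a.natAbs
decreasing_by
  rcases lt_trichotomy a 0 with h | h | h
  · have := PySem.Int.mod_neg_bounds b h; omega
  · exact absurd h _h
  · have h1 := PySem.Int.mod_nonneg b h; have h2 := PySem.Int.mod_lt b h; omega
-- the type of A's dict keys: the Python int key X[i] (`int`) or the reduced-fraction tuple (`frac`)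
inductive PyKey : Type
  | int : Int → PyKey
  | frac : Int → Int → PyKey
deriving DecidableEq, Repr


def solution (X : List Int) (Y : List Int) : Int :=
  let fractions : PySem.Dict PyKey Int :=
    (PySem.List.pyRange 0 (X.length : Int) 1).foldl (fun d i =>
      let x := PySem.List.pyGetD X i 0
      if x = 0 then
        d.insert (PyKey.int x) (d.getD (PyKey.int x) 0 + 1)
      else
        let factor := pyGcd x (PySem.List.pyGetD Y i 0)
        let fraction := (PySem.Int.floordiv x factor, PySem.Int.floordiv (PySem.List.pyGetD Y i 0) factor)
        d.insert (PyKey.frac fraction.1 fraction.2) (d.getD (PyKey.frac fraction.1 fraction.2) 0 + 1)) PySem.Dict.empty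
  (PySem.List.max? fractions.values (fun v => v)).getD 0

-- ===== PORT B =====
-- helper `_reduce` of Source B (`gcd` is the same helper as in Source A)
def reduceFrac (x y : Int) : Int × Int :=
  let g := pyGcd x y
  (PySem.Int.floordiv x g, PySem.Int.floordiv y g)

def solution_alt (X : List Int) (Y : List Int) : Int :=
  let keys := (PySem.List.enumerate X).map (fun p =>
    if p.2 = 0 then ((0 : Int), (0 : Int)) else reduceFrac p.2 (PySem.List.pyGetD Y p.1 0))
  let sortedKeys := PySem.List.sorted2 keys Prod.fst Prod.snd
  (sortedKeys.foldl (fun st k =>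
      let run : Int := if some k = st.2.2 then st.2.1 + 1 else 1
      (if run > st.1 then run else st.1, run, some k)) ((0 : Int), (0 : Int), (none : Option (Int × Int)))).1

-- ===== PRECONDITION & SPEC =====
-- Pre_ excludes exactly the inputs where A raises: empty X (ValueError from max on an empty
-- dict) and indices i with X[i] ≠ 0 but i ≥ len(Y) (IndexError on Y[i]).
def Pre_solution (X : List Int) (Y : List Int) : Prop :=
  X ≠ [] ∧ ∀ i ∈ List.range X.length, X.getD i 0 ≠ 0 → i < Y.length
instance (X : List Int) (Y : List Int) : Decidable (Pre_solution X Y) := by unfold Pre_solution; infer_instance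

def pvWitness_solution : List Int × List Int := ([1, 2, 2], [2, 4, 4])

def Spec_solution (X : List Int) (Y : List Int) (out : Int) : Prop := out = solution_alt X Y
instance (X : List Int) (Y : List Int) (out : Int) : Decidable (Spec_solution X Y out) := by unfold Spec_solution; infer_instance

-- ===== CLAIM (what is proved, stated in full; the proofs are below) =====
def Claim_equal_solution : Prop := ∀ (X : List Int) (Y : List Int), Dom_solution X Y → Pre_solution X Y → Spec_solution X Y (solution X Y)

-- ===== LEMMAS AND PROOFS =====

theorem pyGcd_dvd (a b : Int) : pyGcd a b ∣ a ∧ pyGcd a b ∣ b := by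
  induction a, b using pyGcd.induct with
  | case1 b =>
    rw [pyGcd]; simp
  | case2 a b h ih =>
    rw [pyGcd]; simp only [h, dite_false]
    obtain ⟨h1, h2⟩ := ih
    refine ⟨h2, ?_⟩
    have := PySem.Int.floordiv_mul_add_mod b a
    calc pyGcd (PySem.Int.mod b a) a ∣ PySem.Int.floordiv b a * a + PySem.Int.mod b a :=
      dvd_add (Dvd.dvd.mul_left h2 _) h1
    _ = b := this

theorem reduceFrac_fst_ne_zero (x y : Int) (hx : x ≠ 0) : (reduceFrac x y).1 ≠ 0 := by
  intro h0
  have hdvd : pyGcd x y ∣ x := (pyGcd_dvd x y).1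
  have hm : PySem.Int.mod x (pyGcd x y) = 0 := (PySem.Int.mod_eq_zero_iff_dvd _ _).mpr hdvd
  have := PySem.Int.floordiv_mul_add_mod x (pyGcd x y)
  simp only [reduceFrac] at h0
  rw [h0, hm] at this
  simp at this
  exact hx this.symm

def keyA (X Y : List Int) (i : Int) : PyKey :=
  if PySem.List.pyGetD X i 0 = 0 then PyKey.int (PySem.List.pyGetD X i 0)
  else PyKey.frac (reduceFrac (PySem.List.pyGetD X i 0) (PySem.List.pyGetD Y i 0)).1
                  (reduceFrac (PySem.List.pyGetD X i 0) (PySem.List.pyGetD Y i 0)).2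
def ksA (X Y : List Int) : List PyKey :=
  (PySem.List.pyRange 0 (X.length : Int) 1).map (keyA X Y)
def ksB (X Y : List Int) : List (Int × Int) :=
  (PySem.List.enumerate X).map (fun p =>
    if p.2 = 0 then ((0 : Int), (0 : Int)) else reduceFrac p.2 (PySem.List.pyGetD Y p.1 0))
def phi : PyKey → Int × Int
  | PyKey.int _ => (0, 0)
  | PyKey.frac p q => (p, q)

theorem ksA_good (X Y : List Int) : ∀ k ∈ ksA X Y,
    k = PyKey.int 0 ∨ ∃ p q : Int, k = PyKey.frac p q ∧ p ≠ 0 := by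
  intro k hk
  obtain ⟨i, -, rfl⟩ := List.mem_map.mp hk
  by_cases h : PySem.List.pyGetD X i 0 = 0
  · left; simp [keyA, h]
  · right; rw [keyA, if_neg h]; exact ⟨_, _, rfl, reduceFrac_fst_ne_zero _ _ h⟩

theorem enumerate_eq (X : List Int) (s : Int) :
    PySem.List.enumerate X s = (List.range X.length).map (fun (j : Nat) => (s + (j : Int), X.getD j 0)) := by
  induction X generalizing s with
  | nil => simp [PySem.List.enumerate]
  | cons x t ih =>
    rw [PySem.List.enumerate, ih]
    simp [List.range_succ_eq_map, List.map_map, Function.comp]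
    intro a _
    ring

theorem ksB_eq_map (X Y : List Int) : ksB X Y = (ksA X Y).map phi := by
  unfold ksB ksA
  rw [enumerate_eq, PySem.List.pyRange_zero_natCast]; simp only [List.map_map]
  apply List.map_congr_left
  intro j hj
  by_cases h : X[j]?.getD 0 = 0 <;>
    simp [Function.comp, keyA, phi, PySem.List.pyGetD_natCast, h]

theorem count_phi (X Y : List Int) (k : PyKey) (hk : k ∈ ksA X Y) :
    (ksB X Y).count (phi k) = (ksA X Y).count k := by
  rw [ksB_eq_map, List.count_eq_countP, List.count_eq_countP, List.countP_map]
  apply List.countP_congr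
  intro a ha
  rcases ksA_good X Y a ha with rfl | ⟨p1, p2, rfl, hp⟩ <;>
    rcases ksA_good X Y k hk with rfl | ⟨q1, q2, rfl, hq⟩ <;>
    simp [phi, Function.comp, Prod.ext_iff] <;> omega

theorem solution_eq (X Y : List Int) :
    solution X Y = (PySem.List.max? (((PySem.Set.ofList (ksA X Y)) : List PyKey).map
      (fun k => ((ksA X Y).count k : Int))) (fun v => v)).getD 0 := by
  unfold solution
  have hbody : (fun (d : PySem.Dict PyKey Int) (i : Int) =>
      let x := PySem.List.pyGetD X i 0
      if x = 0 then
        d.insert (PyKey.int x) (d.getD (PyKey.int x) 0 + 1)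
      else
        let factor := pyGcd x (PySem.List.pyGetD Y i 0)
        let fraction := (PySem.Int.floordiv x factor, PySem.Int.floordiv (PySem.List.pyGetD Y i 0) factor)
        d.insert (PyKey.frac fraction.1 fraction.2) (d.getD (PyKey.frac fraction.1 fraction.2) 0 + 1))
      = fun d i => d.insert (keyA X Y i) (d.getD (keyA X Y i) 0 + 1) := by
    funext d i
    by_cases h : PySem.List.pyGetD X i 0 = 0 <;> simp [keyA, reduceFrac, h]
  rw [hbody]
  have h1 : (PySem.List.pyRange 0 (X.length : Int) 1).foldl
      (fun d i => d.insert (keyA X Y i) (d.getD (keyA X Y i) 0 + 1)) PySem.Dict.empty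
      = PySem.Dict.counter (ksA X Y) := by
    rw [← PySem.Dict.foldl_insert_getD_add_one_eq_counter (ksA X Y), ksA, List.foldl_map]
  rw [h1]
  show (PySem.List.max? (PySem.Dict.counter (ksA X Y)).values fun v => v).getD 0 = _
  simp only [PySem.Dict.values, PySem.Dict.items_counter, List.map_map]
  rfl

theorem charA (X Y : List Int) (hX : X ≠ []) :
    (∃ k ∈ ksA X Y, solution X Y = ((ksA X Y).count k : Int)) ∧
    (∀ k ∈ ksA X Y, ((ksA X Y).count k : Int) ≤ solution X Y) := by
  have hlen : (ksA X Y).length = X.length := by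
    rw [ksA, List.length_map, PySem.List.pyRange_zero_natCast, List.length_map, List.length_range]
  have hne : ksA X Y ≠ [] := by
    intro h; apply hX
    rw [h] at hlen; exact List.eq_nil_of_length_eq_zero hlen.symm
  have hsetne : (PySem.Set.ofList (ksA X Y) : List PyKey) ≠ [] := by
    obtain ⟨a, ha⟩ := List.exists_mem_of_ne_nil _ hne
    exact List.ne_nil_of_mem ((PySem.Set.mem_ofList _ _).mpr ha)
  have hLne : ((PySem.Set.ofList (ksA X Y) : List PyKey).map
      (fun k => ((ksA X Y).count k : Int))) ≠ [] := by
    simpa using hsetne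
  rcases hmax : PySem.List.max? (((PySem.Set.ofList (ksA X Y)) : List PyKey).map
      (fun k => ((ksA X Y).count k : Int))) (fun v => v) with _ | m
  · exact absurd ((PySem.List.max?_eq_none_iff _ _).mp hmax) hLne
  · have hval : solution X Y = m := by rw [solution_eq, hmax]; rfl
    constructor
    · obtain ⟨k, hkset, hkm⟩ := List.mem_map.mp (PySem.List.max?_mem hmax)
      exact ⟨k, (PySem.Set.mem_ofList _ _).mp hkset, by rw [hval, ← hkm]⟩
    · intro k hk
      have : ((ksA X Y).count k : Int) ∈ ((PySem.Set.ofList (ksA X Y) : List PyKey).map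
          (fun k => ((ksA X Y).count k : Int))) :=
        List.mem_map_of_mem ((PySem.Set.mem_ofList _ _).mpr hk)
      have := PySem.List.max?_isMax hmax _ this
      rwa [hval]

def lexle (a b : Int × Int) : Prop := toLex a ≤ toLex b

def scanStep (st : Int × Int × Option (Int × Int)) (k : Int × Int) : Int × Int × Option (Int × Int) :=
  let run : Int := if some k = st.2.2 then st.2.1 + 1 else 1
  (if run > st.1 then run else st.1, run, some k)

theorem sorted2_eq_sorted_lex (xs : List (Int × Int)) :
    PySem.List.sorted2 xs Prod.fst Prod.snd = PySem.List.sorted xs (fun t => toLex t) := by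
  have hfun : (fun (a b : Int × Int) => decide (a.1 < b.1) || (!decide (b.1 < a.1) && decide (a.2 < b.2)))
      = (fun a b => decide (toLex a < toLex b)) := by
    funext a b
    rw [Bool.eq_iff_iff]
    simp only [Bool.or_eq_true, Bool.and_eq_true, Bool.not_eq_true',
      decide_eq_true_eq, decide_eq_false_iff_not, Prod.Lex.toLex_lt_toLex]
    omega
  show xs.foldl (fun acc x => PySem.List.insertBy
      (fun a b => decide (a.1 < b.1) || (!decide (b.1 < a.1) && decide (a.2 < b.2))) x acc) []
    = PySem.List.sorted xs (fun t => toLex t)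
  rw [hfun, PySem.List.sorted_eq_foldl_insertBy]

theorem sorted2_pairwise_lex (xs : List (Int × Int)) :
    (PySem.List.sorted2 xs Prod.fst Prod.snd).Pairwise lexle := by
  rw [sorted2_eq_sorted_lex]
  exact PySem.List.sorted_pairwise xs (fun t => toLex t)

theorem lexle_antisymm {a b : Int × Int} (h1 : lexle a b) (h2 : lexle b a) : a = b := by
  have := le_antisymm h1 h2
  exact congrArg (fun t => ofLex t) this

theorem head_run : ∀ (t : List (Int × Int)) (a : Int × Int), (a :: t).Pairwise lexle →
    ∃ (m : Nat) (s' : List (Int × Int)), a :: t = List.replicate m a ++ s' ∧ 1 ≤ m ∧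
      a ∉ s' ∧ s'.Pairwise lexle := by
  intro t
  induction t with
  | nil => intro a _; exact ⟨1, [], rfl, le_refl 1, by simp, List.Pairwise.nil⟩
  | cons b t' ih =>
    intro a hp
    by_cases hab : a = b
    · subst hab
      obtain ⟨m, s', heq, hm, hnot, hpair⟩ := ih a (List.Pairwise.of_cons hp)
      exact ⟨m + 1, s', by rw [List.replicate_succ, List.cons_append, ← heq], by omega, hnot, hpair⟩
    · refine ⟨1, b :: t', rfl, le_refl 1, ?_, List.Pairwise.of_cons hp⟩
      intro hmem
      rcases List.mem_cons.mp hmem with h | h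
      · exact hab h
      · have hab' : lexle a b := (List.pairwise_cons.mp hp).1 b (List.mem_cons_self)
        have hba : lexle b a := (List.pairwise_cons.mp (List.Pairwise.of_cons hp)).1 a h
        exact hab (lexle_antisymm hab' hba)

theorem rep_scan : ∀ (m : Nat) (a : Int × Int) (best run : Int), run ≤ best →
    (List.replicate m a).foldl scanStep (best, run, some a)
      = (max best (run + (m : Int)), run + (m : Int), some a) := by
  intro m
  induction m with
  | zero => intro a best run h; simp [max_eq_left h]
  | succ m ih =>
    intro a best run h
    rw [List.replicate_succ, List.foldl_cons]
    have hite : (if run + 1 > best then run + 1 else best) = max best (run + 1) := by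
      split <;> omega
    have hstep : scanStep (best, run, some a) a = (max best (run + 1), run + 1, some a) := by
      simp only [scanStep, if_true]
      rw [hite]
    rw [hstep, ih a (max best (run + 1)) (run + 1) (le_max_right _ _)]
    simp only [Prod.mk.injEq]
    refine ⟨?_, ?_, trivial⟩ <;> push_cast <;> omega

theorem scan_main : ∀ (n : Nat) (s : List (Int × Int)), s.length ≤ n → s.Pairwise lexle →
    ∀ (best run : Int) (p : Option (Int × Int)), 0 ≤ best → (∀ k ∈ s, p ≠ some k) →
    ((s.foldl scanStep (best, run, p)).1 = best ∨
      ∃ k ∈ s, (s.foldl scanStep (best, run, p)).1 = (s.count k : Int)) ∧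
    best ≤ (s.foldl scanStep (best, run, p)).1 ∧
    ∀ k ∈ s, (s.count k : Int) ≤ (s.foldl scanStep (best, run, p)).1 := by
  intro n
  induction n with
  | zero =>
    intro s hlen _ best run p _ _
    have : s = [] := List.eq_nil_of_length_eq_zero (Nat.le_zero.mp hlen)
    subst this
    simp
  | succ n ih =>
    intro s hlen hpair best run p hbest hp
    match s with
    | [] => simp
    | a :: t =>
      obtain ⟨m, s', heq, hm, hnot, hpair'⟩ := head_run t a hpair
      obtain ⟨m', rfl⟩ : ∃ m', m = m' + 1 := ⟨m - 1, by omega⟩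
      -- counts in a :: t
      have hcnta : (a :: t).count a = m' + 1 := by
        rw [heq, List.count_append, List.count_replicate, List.count_eq_zero.mpr hnot]
        simp
      have hcnt' : ∀ k ∈ s', (a :: t).count k = s'.count k := by
        intro k hk
        have hka : ¬ (a = k) := fun h => hnot (by rw [h]; exact hk)
        rw [heq, List.count_append, List.count_replicate]
        simp [hka]
      have hmem : ∀ k, k ∈ a :: t ↔ (k = a ∨ k ∈ s') := by
        intro k
        rw [heq, List.mem_append]
        constructor
        · rintro (h | h)
          · exact Or.inl (List.eq_of_mem_replicate h)
          · exact Or.inr h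
        · rintro (rfl | h)
          · exact Or.inl (List.mem_replicate.mpr ⟨by omega, rfl⟩)
          · exact Or.inr h
      -- unfold the fold along heq
      have hlen' : s'.length ≤ n := by
        have := congrArg List.length heq
        simp [List.length_replicate] at this
        simp at hlen
        omega
      have hfold : (a :: t).foldl scanStep (best, run, p)
          = s'.foldl scanStep (max best (m' + 1 : Int), (m' + 1 : Int), some a) := by
        rw [heq, List.foldl_append, List.replicate_succ, List.foldl_cons]
        have hstep : scanStep (best, run, p) a = (max best 1, 1, some a) := by
          have hcond : (some a = p) = False := eq_false (fun h => hp a List.mem_cons_self h.symm)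
          have hone : (if (1 : Int) > best then (1 : Int) else best) = max best 1 := by
            split <;> omega
          simp only [scanStep, hcond, if_false, hone]
        rw [hstep, rep_scan m' a (max best 1) 1 (by omega)]
        congr 1
        simp only [Prod.mk.injEq]
        refine ⟨?_, ?_, trivial⟩ <;> omega
      rw [hfold]
      have hp' : ∀ k ∈ s', (some a : Option (Int × Int)) ≠ some k := by
        intro k hk h
        have : a = k := by simpa using h
        exact hnot (this ▸ hk)
      obtain ⟨hchar, hle, hall⟩ := ih s' hlen' hpair' (max best (m' + 1 : Int)) (m' + 1 : Int)
        (some a) (by omega) hp'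
      refine ⟨?_, by omega, ?_⟩
      · rcases hchar with h | ⟨k, hk, h⟩
        · by_cases hb : ((m' : Int) + 1) ≤ best
          · left; omega
          · right
            refine ⟨a, List.mem_cons_self, ?_⟩
            rw [hcnta]; push_cast; omega
        · right
          exact ⟨k, (hmem k).mpr (Or.inr hk), by rw [hcnt' k hk]; exact h⟩
      · intro k hk
        rcases (hmem k).mp hk with rfl | hk'
        · rw [hcnta]; push_cast; omega
        · rw [hcnt' k hk']; exact hall k hk'

theorem charB (X Y : List Int) (hX : X ≠ []) :
    (∃ k ∈ ksB X Y, solution_alt X Y = ((ksB X Y).count k : Int)) ∧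
    (∀ k ∈ ksB X Y, ((ksB X Y).count k : Int) ≤ solution_alt X Y) := by
  have halt : solution_alt X Y = ((PySem.List.sorted2 (ksB X Y) Prod.fst Prod.snd).foldl
      scanStep ((0 : Int), (0 : Int), (none : Option (Int × Int)))).1 := rfl
  set s := PySem.List.sorted2 (ksB X Y) Prod.fst Prod.snd with hs
  have hperm : s.Perm (ksB X Y) := PySem.List.sorted2_perm _ _ _ _
  have hpair : s.Pairwise lexle := sorted2_pairwise_lex _
  obtain ⟨hchar, hle, hall⟩ := scan_main s.length s le_rfl hpair 0 0 none (le_refl 0) (by simp)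
  have hcnt : ∀ k, s.count k = (ksB X Y).count k := fun k => hperm.count_eq k
  have hne : ksB X Y ≠ [] := by
    intro h
    apply hX
    have := congrArg List.length h
    rw [ksB, List.length_map, enumerate_eq, List.length_map, List.length_range] at this
    exact List.eq_nil_of_length_eq_zero this
  have hsne : s ≠ [] := by
    intro h
    rw [h] at hperm
    exact hne (hperm.symm.eq_nil)
  rcases hchar with h0 | ⟨k, hk, hkc⟩
  · exfalso
    obtain ⟨a, ha⟩ := List.exists_mem_of_ne_nil s hsne
    have h1 := hall a ha
    have h2 : 0 < s.count a := List.count_pos_iff.mpr ha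
    rw [h0] at h1
    omega
  · constructor
    · refine ⟨k, hperm.subset hk, ?_⟩
      rw [halt, hkc, hcnt]
    · intro k' hk'
      have hk's : k' ∈ s := hperm.mem_iff.mpr hk'
      have := hall k' hk's
      rw [hcnt] at this
      rw [halt]
      exact this

-- ===== VERDICT (by name: the statement is the Claim_ definition above) =====
theorem solution_spec : Claim_equal_solution := by
  intro X Y _hD hPre
  obtain ⟨hX, -⟩ := hPre
  obtain ⟨⟨ka, hka, hA⟩, hAmax⟩ := charA X Y hX
  obtain ⟨⟨kb, hkb, hB⟩, hBmax⟩ := charB X Y hX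
  show solution X Y = solution_alt X Y
  apply le_antisymm
  · have hmem : phi ka ∈ ksB X Y := by
      rw [ksB_eq_map]; exact List.mem_map_of_mem hka
    have := hBmax (phi ka) hmem
    rwa [count_phi X Y ka hka, ← hA] at this
  · have : kb ∈ (ksA X Y).map phi := by rw [← ksB_eq_map]; exact hkb
    obtain ⟨k0, hk0, rfl⟩ := List.mem_map.mp this
    have := hAmax k0 hk0
    rwa [← count_phi X Y k0 hk0, ← hB] at this
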